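-- pv_equiv track=rewrite | github.com/RodriguesIsrael/A-Battleships-game | run.py | check_boat
-- ===== SOURCE A (Python) =====
-- def check_ok(boat,taken):
--     """ checks to see if its a valid number"""
--     boat.sort()
--     for i in range(len(boat)):
--         num = boat[i]
--         if num in taken:
--             boat = [-1]
--             break
--         elif num < 0 or num > 99:
--             boat = [-1]
--             break
--         elif num % 10 == 9 and i < len(boat)-1: # to avoid number out of range
--             if boat[i+1] % 10 == 0:
--                 boat = [-1]
--                 break
--         if i != 0:
--             if boat[i] != boat[i-1]+1 and boat[i] != boat[i-1]+10:
--                 boat = [-1]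
--                 break
--
--     return boat
--
-- def check_boat(b,start,ristung,taken):
--     # checkes the boat   direction
--
--     boat = []
--     if ristung  == 1:
--         for i in range(b):
--             boat.append(start - i*10)
--             boat =check_ok(boat,taken )
--     elif ristung  == 2:
--         for i in range(b):
--             boat.append(start + i)
--             boat = check_ok(boat,taken)
--     elif ristung  == 3:
--         for i in range(b):
--             boat .append(start + i*10)
--             boat =check_ok(boat,taken)
--     elif ristung == 4:
--         for i in range(b):
--             boat.append(start - i)
--     boat = check_ok(boat,taken)
--     return boat
-- ===== SOURCE B (Python) =====
-- def check_boat(b, start, ristung, taken):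
--     steps = {1: -10, 2: 1, 3: 10, 4: -1}
--     if ristung not in steps:
--         return []
--     step = steps[ristung]
--     cells = sorted(start + i * step for i in range(b))
--     ok = all(0 <= c <= 99 and c not in taken for c in cells) and \
--          all((y - x == 1 or y - x == 10) and not (x % 10 == 9 and y % 10 == 0)
--              for x, y in zip(cells, cells[1:]))
--     return cells if ok else [-1]
-- ===== Notes on version B (the rewrite author's own statement) =====
-- stated objective: simpler
-- what changed: B builds the complete boat cell list from start and direction in one comprehension and validates it with a single sort plus one linear pass (bounds, taken-membership, row-boundary and step checks over adjacent sorted pairs), instead of A's re-sorting and re-scanning the growing list after every appended cell.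
import Mathlib
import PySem

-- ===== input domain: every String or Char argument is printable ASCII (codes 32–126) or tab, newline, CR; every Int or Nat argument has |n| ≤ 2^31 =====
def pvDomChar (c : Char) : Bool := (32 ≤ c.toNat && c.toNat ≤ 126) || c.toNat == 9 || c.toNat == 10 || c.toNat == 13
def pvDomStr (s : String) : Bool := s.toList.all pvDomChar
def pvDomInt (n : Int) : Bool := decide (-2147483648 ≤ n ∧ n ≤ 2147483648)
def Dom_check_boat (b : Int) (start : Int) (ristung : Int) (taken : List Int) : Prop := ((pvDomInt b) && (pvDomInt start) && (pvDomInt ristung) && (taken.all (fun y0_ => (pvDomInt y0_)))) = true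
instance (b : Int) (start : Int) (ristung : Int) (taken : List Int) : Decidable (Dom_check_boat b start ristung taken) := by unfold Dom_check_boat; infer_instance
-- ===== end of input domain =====

-- B builds the whole boat cell list once and validates it with a single sorted pass,
-- instead of re-sorting and re-scanning the growing list after every append (objective: simpler).

-- ===== PORT A =====
-- the index loop of check_ok; Python's nested 'if boat[i+1] % 10 == 0' inside the elif is
-- flattened into one conjunction (exact: both fall through to the same next check);
-- boat[i+1] / boat[i-1] are in range by the guards, ported as getD with dummy 0
def check_ok_loop (boat taken : List Int) (i : Nat) : List Int :=
  if h : i < boat.length then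
    let num := boat[i]
    if num ∈ taken then [-1]
    else if num < 0 ∨ num > 99 then [-1]
    else if PySem.Int.mod num 10 = 9 ∧ i < boat.length - 1 ∧
            PySem.Int.mod (boat.getD (i+1) 0) 10 = 0 then [-1]
    else if i ≠ 0 ∧ num ≠ boat.getD (i-1) 0 + 1 ∧ num ≠ boat.getD (i-1) 0 + 10 then [-1]
    else check_ok_loop boat taken (i+1)
  else boat
termination_by boat.length - i

def check_ok (boat taken : List Int) : List Int :=
  check_ok_loop (PySem.List.sorted boat (fun x => x) false) taken 0

def check_boat (b : Int) (start : Int) (ristung : Int) (taken : List Int) : List Int :=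
  let boat : List Int := []
  let boat :=
    if ristung = 1 then
      (PySem.List.pyRange 0 b 1).foldl (fun bo i => check_ok (bo ++ [start - i * 10]) taken) boat
    else if ristung = 2 then
      (PySem.List.pyRange 0 b 1).foldl (fun bo i => check_ok (bo ++ [start + i]) taken) boat
    else if ristung = 3 then
      (PySem.List.pyRange 0 b 1).foldl (fun bo i => check_ok (bo ++ [start + i * 10]) taken) boat
    else if ristung = 4 then
      (PySem.List.pyRange 0 b 1).foldl (fun bo i => bo ++ [start - i]) boat
    else boat
  check_ok boat taken

-- ===== PORT B =====
-- the two inline conditions of Source B's generator expressions, named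
def elemOkB (taken : List Int) (c : Int) : Bool :=
  decide (0 ≤ c) && decide (c ≤ 99) && !(taken.contains c)

def pairOkB (x y : Int) : Bool :=
  (decide (y - x = 1) || decide (y - x = 10)) &&
    !(decide (PySem.Int.mod x 10 = 9) && decide (PySem.Int.mod y 10 = 0))

def check_boat_alt (b : Int) (start : Int) (ristung : Int) (taken : List Int) : List Int :=
  if ristung = 1 ∨ ristung = 2 ∨ ristung = 3 ∨ ristung = 4 then
    let step : Int := if ristung = 1 then -10 else if ristung = 2 then 1
                      else if ristung = 3 then 10 else -1
    let cells := PySem.List.sorted ((PySem.List.pyRange 0 b 1).map (fun i => start + i * step))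
                   (fun x => x) false
    let ok := cells.all (elemOkB taken) &&
              (cells.zip (PySem.List.slice cells (some 1) none)).all (fun p => pairOkB p.1 p.2)
    if ok then cells else [-1]
  else []

-- ===== PRECONDITION & SPEC =====
def Spec_check_boat (b : Int) (start : Int) (ristung : Int) (taken : List Int) (out : List Int) : Prop := out = check_boat_alt b start ristung taken
instance (b : Int) (start : Int) (ristung : Int) (taken : List Int) (out : List Int) : Decidable (Spec_check_boat b start ristung taken out) := by unfold Spec_check_boat; infer_instance

-- ===== CLAIM (what is proved, stated in full; the proofs are below) =====
def Claim_equal_check_boat : Prop := ∀ (b : Int) (start : Int) (ristung : Int) (taken : List Int), Dom_check_boat b start ristung taken → Spec_check_boat b start ristung taken (check_boat b start ristung taken)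

-- ===== LEMMAS AND PROOFS =====

-- the adjacent pairs of a list
def pairsOf (l : List Int) : List (Int × Int) := l.zip l.tail
def stepOkA (x y : Int) : Bool := decide (y = x + 1) || decide (y = x + 10)
def boundOk (x y : Int) : Bool := !(decide (PySem.Int.mod x 10 = 9) && decide (PySem.Int.mod y 10 = 0))
def okB (taken l : List Int) : Bool :=
  l.all (elemOkB taken) && (pairsOf l).all (fun p => pairOkB p.1 p.2)
def condFrom (taken l : List Int) (i : Nat) : Bool :=
  (l.drop i).all (elemOkB taken) &&
  (pairsOf (l.drop i)).all (fun p => boundOk p.1 p.2) &&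
  (pairsOf (l.drop (i-1))).all (fun p => stepOkA p.1 p.2)

theorem pairsOf_cons_cons (x y : Int) (r : List Int) :
    pairsOf (x :: y :: r) = (x, y) :: pairsOf (y :: r) := rfl

theorem pairsOf_small (l : List Int) (h : l.length ≤ 1) : pairsOf l = [] := by
  match l, h with
  | [], _ => rfl
  | [x], _ => rfl



theorem condFrom_ge (taken l : List Int) (i : Nat) (h : l.length ≤ i) :
    condFrom taken l i = true := by
  have h1 : l.drop i = [] := List.drop_eq_nil_of_le h
  have h2 : pairsOf (l.drop (i-1)) = [] := by
    apply pairsOf_small; rw [List.length_drop]; omega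
  rw [condFrom, h1, h2]
  simp [pairsOf]

theorem condFrom_succ (taken l : List Int) (i : Nat) (h : i < l.length) :
    condFrom taken l i =
      (elemOkB taken l[i]
        && (if h1 : i + 1 < l.length then boundOk l[i] l[i+1] else true)
        && (if h0 : i = 0 then true else stepOkA (l[i-1]'(by omega)) l[i])
        && condFrom taken l (i+1)) := by
  have hdi : l.drop i = l[i] :: l.drop (i+1) := List.drop_eq_getElem_cons h
  rw [Bool.eq_iff_iff]
  by_cases h1 : i + 1 < l.length
  · have hdi1 : l.drop (i+1) = l[i+1] :: l.drop (i+2) := List.drop_eq_getElem_cons h1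
    have hp : pairsOf (l[i] :: l.drop (i+1)) = (l[i], l[i+1]) :: pairsOf (l.drop (i+1)) := by
      rw [hdi1, pairsOf_cons_cons, ← hdi1]
    by_cases h0 : i = 0
    · subst h0
      rw [condFrom, condFrom]
      simp only [Nat.zero_sub, Nat.add_sub_cancel, hdi, hp, List.all_cons,
        dif_pos h1, Bool.and_eq_true]
      simp only [dite_eq_ite, if_pos trivial, Bool.and_eq_true]
      tauto
    · obtain ⟨j, rfl⟩ : ∃ j, i = j + 1 := ⟨i - 1, by omega⟩
      have hdp : l.drop j = (l[j]'(by omega)) :: l.drop (j+1) := List.drop_eq_getElem_cons (by omega)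
      have hps : pairsOf (l.drop j) = ((l[j]'(by omega)), l[j+1]) :: pairsOf (l.drop (j+1)) := by
        rw [hdp, hdi, pairsOf_cons_cons, ← hdi]
      rw [condFrom, condFrom]
      simp only [Nat.add_sub_cancel, hps, hdi, hp, List.all_cons, dif_pos h1,
        dif_neg h0, Bool.and_eq_true]
      tauto
  · have hnil : l.drop (i+1) = [] := List.drop_eq_nil_of_le (by omega)
    have hp : pairsOf (l.drop i) = [] := by
      apply pairsOf_small; rw [List.length_drop]; omega
    have hpp : pairsOf (l.drop (i+1)) = [] := by rw [hnil]; rfl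
    by_cases h0 : i = 0
    · subst h0
      rw [condFrom, condFrom]
      simp only [Nat.zero_sub, Nat.add_sub_cancel, hp, hpp, hnil, hdi, ← hdi, List.all_cons,
        List.all_nil, dif_neg h1, Bool.and_eq_true]
      simp only [dite_eq_ite, if_pos trivial, Bool.and_eq_true]
      tauto
    · obtain ⟨j, rfl⟩ : ∃ j, i = j + 1 := ⟨i - 1, by omega⟩
      have hdp : l.drop j = (l[j]'(by omega)) :: l.drop (j+1) := List.drop_eq_getElem_cons (by omega)
      have hps : pairsOf (l.drop j) = ((l[j]'(by omega)), l[j+1]) :: pairsOf (l.drop (j+1)) := by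
        rw [hdp, hdi, pairsOf_cons_cons, ← hdi]
      rw [condFrom, condFrom]
      simp only [Nat.add_sub_cancel, hp, hps, hpp, hnil, hdi, ← hdi, List.all_cons,
        List.all_nil, dif_neg h1, dif_neg h0, Bool.and_eq_true]
      tauto

theorem loop_eq (taken l : List Int) (i : Nat) :
    check_ok_loop l taken i = if condFrom taken l i then l else [-1] := by
  have key : ∀ k i, l.length - i ≤ k →
      check_ok_loop l taken i = if condFrom taken l i then l else [-1] := by
    intro k
    induction k with
    | zero =>
      intro i hk
      have h : ¬ i < l.length := by omega
      rw [check_ok_loop, dif_neg h, condFrom_ge taken l i (by omega), if_pos rfl]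
    | succ k ih =>
      intro i hk
      by_cases h : i < l.length
      · rw [check_ok_loop]
        simp only [h, ↓reduceDIte]
        rw [condFrom_succ taken l i h]
        by_cases ht : l[i] ∈ taken
        · have he : elemOkB taken l[i] = false := by simp [elemOkB, ht]
          simp [ht, he]
        · by_cases hr : l[i] < 0 ∨ l[i] > 99
          · have he : elemOkB taken l[i] = false := by
              simp only [elemOkB, Bool.and_eq_false_iff, decide_eq_false_iff_not]
              omega
            simp [ht, hr, he]
          · push_neg at hr
            have he : elemOkB taken l[i] = true := by
              simp only [elemOkB, Bool.and_eq_true, decide_eq_true_eq, Bool.not_eq_true',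
                List.contains_eq_mem, decide_eq_false_iff_not]
              exact ⟨⟨hr.1, hr.2⟩, ht⟩
            by_cases hb : PySem.Int.mod l[i] 10 = 9 ∧ i < l.length - 1 ∧
                PySem.Int.mod (l.getD (i+1) 0) 10 = 0
            · have h1 : i + 1 < l.length := by omega
              have hgd : l.getD (i+1) 0 = l[i+1] := List.getD_eq_getElem l 0 h1
              have hbo : boundOk l[i] l[i+1] = false := by
                simp only [boundOk, Bool.not_eq_eq_eq_not, Bool.not_false, Bool.and_eq_true,
                  decide_eq_true_eq]
                exact ⟨hb.1, hgd ▸ hb.2.2⟩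
              rw [if_neg ht, if_neg (show ¬(l[i] < 0 ∨ l[i] > 99) by omega), if_pos hb,
                dif_pos h1, hbo]
              simp
            · by_cases hs : i ≠ 0 ∧ l[i] ≠ l.getD (i-1) 0 + 1 ∧ l[i] ≠ l.getD (i-1) 0 + 10
              · have hip : i - 1 < l.length := by omega
                have hgd : l.getD (i-1) 0 = l[i-1] := List.getD_eq_getElem l 0 hip
                have hso : stepOkA (l[i-1]'hip) l[i] = false := by
                  simp only [stepOkA, Bool.or_eq_false_iff, decide_eq_false_iff_not]
                  exact ⟨hgd ▸ hs.2.1, hgd ▸ hs.2.2⟩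
                rw [if_neg ht, if_neg (show ¬(l[i] < 0 ∨ l[i] > 99) by omega), if_neg hb,
                  if_pos hs, dif_neg hs.1, hso]
                simp
              · rw [ih (i+1) (by omega)]
                have hbp : (if h1 : i + 1 < l.length then boundOk l[i] l[i+1] else true) = true := by
                  by_cases h1 : i + 1 < l.length
                  · have hgd : l.getD (i+1) 0 = l[i+1] := List.getD_eq_getElem l 0 h1
                    simp only [dif_pos h1, boundOk, Bool.not_eq_eq_eq_not, Bool.not_true,
                      Bool.and_eq_false_iff, decide_eq_false_iff_not]
                    by_cases h9 : PySem.Int.mod l[i] 10 = 9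
                    · right; intro hc; exact hb ⟨h9, by omega, hgd ▸ hc⟩
                    · left; exact h9
                  · exact dif_neg h1
                have hsp : (if h0 : i = 0 then true
                    else stepOkA (l[i-1]'(by omega)) l[i]) = true := by
                  by_cases h0 : i = 0
                  · exact dif_pos h0
                  · have hip : i - 1 < l.length := by omega
                    have hgd : l.getD (i-1) 0 = l[i-1] := List.getD_eq_getElem l 0 hip
                    rw [dif_neg h0]
                    simp only [stepOkA, Bool.or_eq_true, decide_eq_true_eq]
                    rcases not_and_or.mp hs with hc | hc
                    · exact absurd h0 (by simpa using hc)
                    · rcases not_and_or.mp hc with hc2 | hc2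
                      · left; rw [← hgd]; exact not_not.mp hc2
                      · right; rw [← hgd]; exact not_not.mp hc2
                rw [if_neg ht, if_neg (show ¬(l[i] < 0 ∨ l[i] > 99) by omega), if_neg hb,
                  if_neg hs, he, hbp, hsp]
                simp
      · have hge := condFrom_ge taken l i (by omega)
        rw [check_ok_loop, dif_neg h, hge, if_pos rfl]
  exact key (l.length - i) i le_rfl

theorem pairOkB_split (x y : Int) : pairOkB x y = (stepOkA x y && boundOk x y) := by
  simp only [pairOkB, stepOkA, boundOk]
  have h1 : decide (y - x = 1) = decide (y = x + 1) := by
    simp only [decide_eq_decide]; omega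
  have h2 : decide (y - x = 10) = decide (y = x + 10) := by
    simp only [decide_eq_decide]; omega
  rw [h1, h2]

theorem all_pairOkB_split (ps : List (Int × Int)) :
    (ps.all fun p => pairOkB p.1 p.2) =
      ((ps.all fun p => stepOkA p.1 p.2) && (ps.all fun p => boundOk p.1 p.2)) := by
  induction ps with
  | nil => rfl
  | cons p ps ih =>
    rw [List.all_cons, List.all_cons, List.all_cons, pairOkB_split p.1 p.2, ih,
      Bool.eq_iff_iff]
    simp only [Bool.and_eq_true]
    tauto

theorem condFrom_zero (taken l : List Int) : condFrom taken l 0 = okB taken l := by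
  rw [condFrom, okB]
  simp only [List.drop_zero, Nat.zero_sub, all_pairOkB_split]
  rw [Bool.eq_iff_iff]
  simp only [Bool.and_eq_true]
  tauto

theorem check_ok_eq (boat taken : List Int) :
    check_ok boat taken =
      (if okB taken (PySem.List.sorted boat (fun x => x) false)
       then PySem.List.sorted boat (fun x => x) false else [-1]) := by
  rw [check_ok, loop_eq, condFrom_zero]

-- failure is absorbing: a negative member falsifies okB
theorem okB_of_neg_mem (taken l : List Int) (x : Int) (hx : x ∈ l) (hneg : x < 0) :
    okB taken l = false := by
  rw [okB]
  have : l.all (elemOkB taken) = false := by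
    rw [List.all_eq_false]
    exact ⟨x, hx, by simp [elemOkB]; omega⟩
  rw [this, Bool.false_and]

theorem pairsOf_append_sub (l : List Int) (c : Int) (p : Int × Int) (hp : p ∈ pairsOf l) :
    p ∈ pairsOf (l ++ [c]) := by
  induction l with
  | nil => simp [pairsOf] at hp
  | cons a as ih =>
    cases as with
    | nil => simp [pairsOf] at hp
    | cons b bs =>
      rw [pairsOf_cons_cons] at hp
      simp only [List.cons_append, pairsOf_cons_cons]
      rcases List.mem_cons.mp hp with rfl | hp'
      · exact List.mem_cons_self ..
      · exact List.mem_cons_of_mem _ (ih hp')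

-- dropping the last cell of a valid run keeps it valid
theorem okB_append (taken l : List Int) (c : Int) (h : okB taken (l ++ [c]) = true) :
    okB taken l = true := by
  rw [okB] at h ⊢
  simp only [Bool.and_eq_true, List.all_eq_true] at h ⊢
  exact ⟨fun x hx => h.1 x (by simp [hx]),
    fun p hp => h.2 p (pairsOf_append_sub l c p hp)⟩

-- dropping the first cell of a valid run keeps it valid
theorem okB_cons (taken l : List Int) (c : Int) (h : okB taken (c :: l) = true) :
    okB taken l = true := by
  rw [okB] at h ⊢
  simp only [Bool.and_eq_true, List.all_eq_true] at h ⊢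
  refine ⟨fun x hx => h.1 x (List.mem_cons_of_mem _ hx), fun p hp => h.2 p ?_⟩
  cases l with
  | nil => simp [pairsOf] at hp
  | cons b bs => rw [pairsOf_cons_cons]; exact List.mem_cons_of_mem _ hp
theorem check_ok_perm (l1 l2 taken : List Int) (h : l1.Perm l2) :
    check_ok l1 taken = check_ok l2 taken := by
  rw [check_ok_eq, check_ok_eq,
    PySem.List.sorted_eq_sorted_of_perm l1 l2 (fun x => x) (fun a b hab => hab) h]

theorem check_ok_neg (taken : List Int) (l : List Int) (x : Int) (hx : x ∈ l) (hneg : x < 0) :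
    check_ok l taken = [-1] := by
  rw [check_ok_eq]
  rw [okB_of_neg_mem taken _ x ((PySem.List.mem_sorted l (fun x => x) false x).mpr hx) hneg]
  simp

theorem check_ok_idem (l taken : List Int) :
    check_ok (check_ok l taken) taken = check_ok l taken := by
  rw [check_ok_eq l]
  by_cases hok : okB taken (PySem.List.sorted l (fun x => x) false) = true
  · rw [if_pos hok, check_ok_eq, PySem.List.sorted_sorted]
    rw [if_pos hok]
  · rw [if_neg hok]
    exact check_ok_neg taken [-1] (-1) (by simp) (by norm_num)

theorem foldl_check (taken : List Int) (cell : Nat → Int)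
    (hpref : ∀ n, okB taken (PySem.List.sorted ((List.range (n+1)).map cell) (fun x => x) false) = true →
        okB taken (PySem.List.sorted ((List.range n).map cell) (fun x => x) false) = true) :
    ∀ n, (List.range n).foldl (fun bo j => check_ok (bo ++ [cell j]) taken) [] =
        check_ok ((List.range n).map cell) taken := by
  intro n
  induction n with
  | zero =>
    have hs : PySem.List.sorted ([] : List Int) (fun x => x) false = [] :=
      PySem.List.sorted_eq_self_of_pairwise [] (fun x => x) List.Pairwise.nil
    simp [check_ok_eq, hs, okB, pairsOf]
  | succ n ih =>
    rw [List.range_succ, List.foldl_append, List.foldl_cons, List.foldl_nil, ih]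
    by_cases hok : okB taken (PySem.List.sorted ((List.range n).map cell) (fun x => x) false) = true
    · rw [check_ok_eq ((List.range n).map cell), if_pos hok]
      apply check_ok_perm
      rw [List.map_append]
      exact (PySem.List.sorted_perm _ _ _).append_right _
    · rw [check_ok_eq ((List.range n).map cell), if_neg hok]
      rw [check_ok_neg taken _ (-1) (by simp) (by norm_num)]
      rw [check_ok_eq]
      have h2 := hpref n
      rw [List.range_succ] at h2
      rw [if_neg (fun hc => hok (h2 hc))]

theorem sorted_map_inc (cell : Nat → Int) (hmono : ∀ a b : Nat, a < b → cell a < cell b) (n : Nat) :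
    PySem.List.sorted ((List.range n).map cell) (fun x => x) false = (List.range n).map cell :=
  PySem.List.sorted_eq_self_of_pairwise ((List.range n).map cell) (fun x => x)
    ((List.pairwise_map).mpr (List.pairwise_lt_range.imp (fun h => le_of_lt (hmono _ _ h))))

theorem sorted_map_dec (cell : Nat → Int) (hmono : ∀ a b : Nat, a < b → cell b < cell a) (n : Nat) :
    PySem.List.sorted ((List.range n).map cell) (fun x => x) false =
      ((List.range n).map cell).reverse :=
  PySem.List.sorted_eq_of_perm_of_pairwise_lt ((List.range n).map cell)
    (((List.range n).map cell).reverse) (fun x => x) (List.reverse_perm _)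
    ((List.pairwise_reverse).mpr ((List.pairwise_map).mpr
      (List.pairwise_lt_range.imp (fun h => hmono _ _ h))))

theorem hpref_inc (taken : List Int) (cell : Nat → Int)
    (hmono : ∀ a b : Nat, a < b → cell a < cell b) (n : Nat)
    (h : okB taken (PySem.List.sorted ((List.range (n+1)).map cell) (fun x => x) false) = true) :
    okB taken (PySem.List.sorted ((List.range n).map cell) (fun x => x) false) = true := by
  rw [sorted_map_inc cell hmono] at h ⊢
  rw [List.range_succ, List.map_append] at h
  exact okB_append _ _ _ h

theorem hpref_dec (taken : List Int) (cell : Nat → Int)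
    (hmono : ∀ a b : Nat, a < b → cell b < cell a) (n : Nat)
    (h : okB taken (PySem.List.sorted ((List.range (n+1)).map cell) (fun x => x) false) = true) :
    okB taken (PySem.List.sorted ((List.range n).map cell) (fun x => x) false) = true := by
  rw [sorted_map_dec cell hmono] at h ⊢
  rw [List.range_succ, List.map_append, List.reverse_append] at h
  simp only [List.map_cons, List.map_nil, List.reverse_cons, List.reverse_nil,
    List.nil_append, List.cons_append] at h
  exact okB_cons _ _ _ h

theorem pyRange_zero_eq (b : Int) :
    PySem.List.pyRange 0 b 1 = (List.range b.toNat).map (fun k : Nat => (k : Int)) := by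
  rw [PySem.List.pyRange_one]; simp

theorem check_ok_nil (taken : List Int) : check_ok [] taken = [] := by
  have hs : PySem.List.sorted ([] : List Int) (fun x => x) false = [] :=
    PySem.List.sorted_eq_self_of_pairwise [] (fun x => x) List.Pairwise.nil
  simp [check_ok_eq, hs, okB, pairsOf]

theorem dirA (taken : List Int) (cell : Nat → Int)
    (hpref : ∀ n, okB taken (PySem.List.sorted ((List.range (n+1)).map cell) (fun x => x) false) = true →
        okB taken (PySem.List.sorted ((List.range n).map cell) (fun x => x) false) = true) (n : Nat) :
    check_ok ((List.range n).foldl (fun bo j => check_ok (bo ++ [cell j]) taken) []) taken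
      = check_ok ((List.range n).map cell) taken := by
  rw [foldl_check taken cell hpref n, check_ok_idem]

theorem alt_core (taken L : List Int) :
    (if (PySem.List.sorted L (fun x => x) false).all (elemOkB taken) &&
        ((PySem.List.sorted L (fun x => x) false).zip
          (PySem.List.slice (PySem.List.sorted L (fun x => x) false) (some 1) none)).all
          (fun p => pairOkB p.1 p.2)
     then PySem.List.sorted L (fun x => x) false else [-1]) = check_ok L taken := by
  have h1 : (1 : Int) = ((1 : Nat) : Int) := by norm_num
  have hs : PySem.List.slice (PySem.List.sorted L (fun x => x) false) (some 1) none
      = (PySem.List.sorted L (fun x => x) false).tail := by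
    rw [h1, PySem.List.slice_from_natCast, List.drop_one]
  rw [check_ok_eq, hs]
  rfl

theorem check_boat_eq_1 (b start : Int) (taken : List Int) :
    check_boat b start 1 taken
      = check_ok ((List.range b.toNat).map (fun j : Nat => start - (j : Int) * 10)) taken := by
  show check_ok ((PySem.List.pyRange 0 b 1).foldl
      (fun bo i => check_ok (bo ++ [start - i * 10]) taken) []) taken = _
  rw [pyRange_zero_eq, List.foldl_map]
  exact dirA taken (fun j : Nat => start - (j : Int) * 10)
    (fun n h => hpref_dec taken _ (by intro a c hac; push_cast; omega) n h) b.toNat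
theorem alt_eq_1 (b start : Int) (taken : List Int) :
    check_boat_alt b start 1 taken
      = check_ok ((List.range b.toNat).map (fun j : Nat => start - (j : Int) * 10)) taken := by
  rw [check_boat_alt, if_pos (Or.inl rfl : (1:Int) = 1 ∨ (1:Int) = 2 ∨ (1:Int) = 3 ∨ (1:Int) = 4)]
  simp only [if_true, ite_true, reduceIte]
  rw [pyRange_zero_eq, List.map_map]
  have hc : ((fun i : Int => start + i * (-10)) ∘ fun k : Nat => (k : Int))
      = fun j : Nat => start - (j : Int) * 10 := funext fun j => by simp; ring
  rw [hc, alt_core]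
theorem check_boat_eq_2 (b start : Int) (taken : List Int) :
    check_boat b start 2 taken
      = check_ok ((List.range b.toNat).map (fun j : Nat => start + (j : Int))) taken := by
  show check_ok ((PySem.List.pyRange 0 b 1).foldl
      (fun bo i => check_ok (bo ++ [start + i]) taken) []) taken = _
  rw [pyRange_zero_eq, List.foldl_map]
  exact dirA taken (fun j : Nat => start + (j : Int))
    (fun n h => hpref_inc taken _ (by intro a c hac; push_cast; omega) n h) b.toNat

theorem check_boat_eq_3 (b start : Int) (taken : List Int) :
    check_boat b start 3 taken
      = check_ok ((List.range b.toNat).map (fun j : Nat => start + (j : Int) * 10)) taken := by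
  show check_ok ((PySem.List.pyRange 0 b 1).foldl
      (fun bo i => check_ok (bo ++ [start + i * 10]) taken) []) taken = _
  rw [pyRange_zero_eq, List.foldl_map]
  exact dirA taken (fun j : Nat => start + (j : Int) * 10)
    (fun n h => hpref_inc taken _ (by intro a c hac; push_cast; omega) n h) b.toNat

theorem check_boat_eq_4 (b start : Int) (taken : List Int) :
    check_boat b start 4 taken
      = check_ok ((List.range b.toNat).map (fun j : Nat => start - (j : Int))) taken := by
  show check_ok ((PySem.List.pyRange 0 b 1).foldl
      (fun bo i => bo ++ [start - i]) []) taken = _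
  rw [pyRange_zero_eq, List.foldl_map, PySem.List.foldl_append_singleton_eq_map]
  rw [List.nil_append]

theorem alt_eq_2 (b start : Int) (taken : List Int) :
    check_boat_alt b start 2 taken
      = check_ok ((List.range b.toNat).map (fun j : Nat => start + (j : Int))) taken := by
  rw [check_boat_alt,
    if_pos (Or.inr (Or.inl rfl) : (2:Int) = 1 ∨ (2:Int) = 2 ∨ (2:Int) = 3 ∨ (2:Int) = 4)]
  simp only [show ((2:Int) = 1) = False from by norm_num, if_false, reduceIte]
  rw [pyRange_zero_eq, List.map_map]
  have hc : ((fun i : Int => start + i * 1) ∘ fun k : Nat => (k : Int))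
      = fun j : Nat => start + (j : Int) := funext fun j => by simp
  rw [hc, alt_core]

theorem alt_eq_3 (b start : Int) (taken : List Int) :
    check_boat_alt b start 3 taken
      = check_ok ((List.range b.toNat).map (fun j : Nat => start + (j : Int) * 10)) taken := by
  rw [check_boat_alt,
    if_pos (Or.inr (Or.inr (Or.inl rfl)) : (3:Int) = 1 ∨ (3:Int) = 2 ∨ (3:Int) = 3 ∨ (3:Int) = 4)]
  simp only [show ((3:Int) = 1) = False from by norm_num,
    show ((3:Int) = 2) = False from by norm_num, if_false, reduceIte]
  rw [pyRange_zero_eq, List.map_map]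
  have hc : ((fun i : Int => start + i * 10) ∘ fun k : Nat => (k : Int))
      = fun j : Nat => start + (j : Int) * 10 := funext fun j => by simp
  rw [hc, alt_core]

theorem alt_eq_4 (b start : Int) (taken : List Int) :
    check_boat_alt b start 4 taken
      = check_ok ((List.range b.toNat).map (fun j : Nat => start - (j : Int))) taken := by
  rw [check_boat_alt,
    if_pos (Or.inr (Or.inr (Or.inr rfl)) : (4:Int) = 1 ∨ (4:Int) = 2 ∨ (4:Int) = 3 ∨ (4:Int) = 4)]
  simp only [show ((4:Int) = 1) = False from by norm_num,
    show ((4:Int) = 2) = False from by norm_num,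
    show ((4:Int) = 3) = False from by norm_num, if_false, reduceIte]
  rw [pyRange_zero_eq, List.map_map]
  have hc : ((fun i : Int => start + i * (-1)) ∘ fun k : Nat => (k : Int))
      = fun j : Nat => start - (j : Int) := funext fun j => by simp; ring
  rw [hc, alt_core]

theorem check_boat_spec_main (b start ristung : Int) (taken : List Int) :
    check_boat b start ristung taken = check_boat_alt b start ristung taken := by
  by_cases h1 : ristung = 1
  · subst h1; rw [check_boat_eq_1, alt_eq_1]
  · by_cases h2 : ristung = 2
    · subst h2; rw [check_boat_eq_2, alt_eq_2]
    · by_cases h3 : ristung = 3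
      · subst h3; rw [check_boat_eq_3, alt_eq_3]
      · by_cases h4 : ristung = 4
        · subst h4; rw [check_boat_eq_4, alt_eq_4]
        · rw [check_boat, if_neg h1, if_neg h2, if_neg h3, if_neg h4, check_ok_nil,
            check_boat_alt,
            if_neg (show ¬(ristung = 1 ∨ ristung = 2 ∨ ristung = 3 ∨ ristung = 4) by tauto)]

-- ===== VERDICT (by name: the statement is the Claim_ definition above) =====
theorem check_boat_spec : Claim_equal_check_boat := by
  intro b start ristung taken _
  exact check_boat_spec_main b start ristung taken
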